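-- pv_equiv track=rewrite | github.com/JensLiu/vortex_tools | trace_analysis/parsing.py | summarise_data_fields
-- ===== SOURCE A (Python) =====
-- from typing import Dict, Iterable, List, Optional, Tuple
--
-- def summarise_data_fields(fields: Dict[str, str]) -> str:
--     if not fields:
--         return ""
--
--     primary_keys = [
--         "ex",
--         "op",
--         "instr",
--         "rd",
--         "wb",
--         "sop",
--         "eop",
--         "addr",
--         "tag",
--         "pid",
--         "ibuf_idx",
--         "batch_idx",
--         "valid",
--         "pmask",
--         "offset",
--         "byteen",
--         "flags",
--         "data",
--         "rs1_data",
--         "rs2_data",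
--         "rs3_data",
--     ]
--
--     out: List[str] = []
--     skip_keys = {"wid", "pc", "tmask", "sid"}
--     for key in primary_keys:
--         if key in fields and key not in skip_keys:
--             out.append(f"{key}={fields[key]}")
--
--     for key in sorted(fields.keys()):
--         if key in skip_keys:
--             continue
--         if key not in primary_keys:
--             value = fields[key]
--             if value:
--                 out.append(f"{key}={value}")
--             else:
--                 out.append(key)
--
--     return ", ".join(out)
-- ===== SOURCE B (Python) =====
-- def summarise_data_fields(fields):
--     if not fields:
--         return ""
--
--     primary_keys = [
--         "ex", "op", "instr", "rd", "wb", "sop", "eop", "addr", "tag", "pid",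
--         "ibuf_idx", "batch_idx", "valid", "pmask", "offset", "byteen",
--         "flags", "data", "rs1_data", "rs2_data", "rs3_data",
--     ]
--     skip_keys = {"wid", "pc", "tmask", "sid"}
--     rank = {k: i for i, k in enumerate(primary_keys)}
--
--     keys = sorted((k for k in fields if k not in skip_keys),
--                   key=lambda k: (rank.get(k, len(primary_keys)), k))
--
--     parts = []
--     for k in keys:
--         if k in rank:
--             parts.append(f"{k}={fields[k]}")
--         else:
--             v = fields[k]
--             parts.append(f"{k}={v}" if v else k)
--     return ", ".join(parts)
-- ===== Notes on version B (the rewrite author's own statement) =====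
-- stated objective: alternative
-- what changed: Replaced A's two separate output loops (a scan of the primary-key list, then a scan of the alphabetically sorted remaining keys) by one composite rank function (primary index, then key) used to sort the non-skip keys once, followed by a single emission pass.
import Mathlib
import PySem

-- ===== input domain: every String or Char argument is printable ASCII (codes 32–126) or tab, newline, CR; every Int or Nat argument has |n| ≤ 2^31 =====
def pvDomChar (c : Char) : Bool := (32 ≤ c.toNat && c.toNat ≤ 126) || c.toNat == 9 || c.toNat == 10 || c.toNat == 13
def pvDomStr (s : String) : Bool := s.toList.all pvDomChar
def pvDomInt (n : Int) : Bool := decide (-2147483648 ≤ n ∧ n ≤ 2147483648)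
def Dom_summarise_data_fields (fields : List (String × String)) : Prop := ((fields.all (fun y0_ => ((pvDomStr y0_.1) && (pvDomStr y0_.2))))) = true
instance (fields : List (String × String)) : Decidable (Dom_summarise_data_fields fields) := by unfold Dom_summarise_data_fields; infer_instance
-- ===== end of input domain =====

-- B replaces A's two output loops by one rank-keyed sort of the non-skip keys followed by a single
-- emission pass (objective: alternative decomposition, same cost). Equivalence is about the return value.

-- ===== PORT A =====
def pvPrimaryKeys : List String :=
  ["ex", "op", "instr", "rd", "wb", "sop", "eop", "addr", "tag", "pid",
   "ibuf_idx", "batch_idx", "valid", "pmask", "offset", "byteen",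
   "flags", "data", "rs1_data", "rs2_data", "rs3_data"]

def pvSkipKeys : PySem.Set String := PySem.Set.ofList ["wid", "pc", "tmask", "sid"]

def summarise_data_fields (fields : List (String × String)) : String :=
  if fields.isEmpty then "" else
  let d : PySem.Dict String String := PySem.Dict.mk fields
  let out : List String :=
    pvPrimaryKeys.foldl (fun out key =>
      if d.contains key && !(PySem.Set.contains pvSkipKeys key) then
        out ++ [key ++ "=" ++ d.getD key ""]
      else out) []
  let out :=
    (PySem.List.sorted d.keys (fun k => k)).foldl (fun out key =>
      if PySem.Set.contains pvSkipKeys key then out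
      else if pvPrimaryKeys.contains key then out
      else
        let v := d.getD key ""
        if v ≠ "" then out ++ [key ++ "=" ++ v] else out ++ [key]) out
  PySem.Str.join ", " out

-- ===== PORT B =====
-- rank = {k: i for i, k in enumerate(primary_keys)}
def pvRank : PySem.Dict String Int :=
  (PySem.List.enumerate pvPrimaryKeys).foldl (fun r p => r.insert p.2 p.1) PySem.Dict.empty

def summarise_data_fields_alt (fields : List (String × String)) : String :=
  if fields.isEmpty then "" else
  let d : PySem.Dict String String := PySem.Dict.mk fields
  -- sorted((k for k in fields if k not in skip_keys), key=lambda k: (rank.get(k, len(primary_keys)), k))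
  let keys :=
    PySem.List.sorted (d.keys.filter (fun k => !(PySem.Set.contains pvSkipKeys k)))
      (fun k => toLex (pvRank.getD k (pvPrimaryKeys.length : Int), k))
  let parts := keys.foldl (fun acc k =>
      if pvRank.contains k then acc ++ [k ++ "=" ++ d.getD k ""]
      else
        let v := d.getD k ""
        acc ++ [if v ≠ "" then k ++ "=" ++ v else k]) []
  PySem.Str.join ", " parts

-- ===== PRECONDITION & SPEC =====
-- `fields` stands for a Python dict, whose keys are always unique; Pre_ excludes association
-- lists with duplicate keys, which no dict argument can produce.
def Pre_summarise_data_fields (fields : List (String × String)) : Prop :=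
  (fields.map Prod.fst).Nodup
instance (fields : List (String × String)) : Decidable (Pre_summarise_data_fields fields) := by
  unfold Pre_summarise_data_fields; infer_instance

def pvWitness_summarise_data_fields : (List (String × String)) :=
  [("op", "LW"), ("wid", "1"), ("uuid", "7"), ("alu", "")]

def Spec_summarise_data_fields (fields : List (String × String)) (out : String) : Prop :=
  out = summarise_data_fields_alt fields
instance (fields : List (String × String)) (out : String) : Decidable (Spec_summarise_data_fields fields out) := by
  unfold Spec_summarise_data_fields; infer_instance

-- ===== CLAIM (what is proved, stated in full; the proofs are below) =====
def Claim_equal_summarise_data_fields : Prop := ∀ (fields : List (String × String)), Dom_summarise_data_fields fields → Pre_summarise_data_fields fields → Spec_summarise_data_fields fields (summarise_data_fields fields)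

-- ===== LEMMAS AND PROOFS =====

theorem pv_primary_nodup : pvPrimaryKeys.Nodup := by decide

theorem pv_primary_not_skip : ∀ k ∈ pvPrimaryKeys, k ∉ pvSkipKeys := by decide

theorem pv_rank_keys : pvRank.keys = pvPrimaryKeys := by decide

theorem pv_rank_contains (k : String) :
    pvRank.contains k = decide (k ∈ pvPrimaryKeys) := by
  rw [PySem.Dict.contains_eq_decide_mem_keys, pv_rank_keys]

theorem pv_rank_getD_of_not_mem (k : String) (h : k ∉ pvPrimaryKeys) :
    pvRank.getD k (pvPrimaryKeys.length : Int) = (pvPrimaryKeys.length : Int) := by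
  apply PySem.Dict.getD_of_not_contains
  rw [pv_rank_contains]; simpa using h

theorem pv_rank_getD_lt : ∀ k ∈ pvPrimaryKeys,
    pvRank.getD k (pvPrimaryKeys.length : Int) < (pvPrimaryKeys.length : Int) := by decide

theorem pv_primary_pairwise :
    pvPrimaryKeys.Pairwise (fun a b =>
      toLex (pvRank.getD a (pvPrimaryKeys.length : Int), a) <
      toLex (pvRank.getD b (pvPrimaryKeys.length : Int), b)) := by decide

-- ===== VERDICT =====
theorem summarise_data_fields_spec : Claim_equal_summarise_data_fields := by
  intro fields _hdom hpre
  unfold Spec_summarise_data_fields summarise_data_fields summarise_data_fields_alt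
  by_cases hemp : fields.isEmpty
  · simp [hemp]
  · simp only [hemp]
    set d : PySem.Dict String String := PySem.Dict.mk fields with hd
    have hnd : d.keys.Nodup := hpre
    -- abbreviations
    set key : String → Lex (Int × String) :=
      fun k => toLex (pvRank.getD k (pvPrimaryKeys.length : Int), k) with hkey
    set emitP : String → String := fun k => k ++ "=" ++ d.getD k "" with hemitP
    set emitS : String → String :=
      fun k => if d.getD k "" ≠ "" then k ++ "=" ++ d.getD k "" else k with hemitS
    set Mp : List String := pvPrimaryKeys.filter (fun k => d.contains k) with hMp
    set Ms : List String :=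
      (PySem.List.sorted d.keys (fun k => k)).filter
        (fun k => !(PySem.Set.contains pvSkipKeys k) && !(pvPrimaryKeys.contains k)) with hMs
    set ks : List String := d.keys.filter (fun k => !(PySem.Set.contains pvSkipKeys k)) with hks
    -- membership facts
    have hMp_mem : ∀ x, x ∈ Mp ↔ x ∈ pvPrimaryKeys ∧ x ∈ d.keys := by
      intro x
      simp [hMp, List.mem_filter, PySem.Dict.contains_eq_decide_mem_keys]
    have hMs_mem : ∀ x, x ∈ Ms ↔ x ∈ d.keys ∧
        PySem.Set.contains pvSkipKeys x = false ∧ x ∉ pvPrimaryKeys := by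
      intro x
      simp [hMs, List.mem_filter, PySem.List.mem_sorted]
    -- A's first loop
    have hA1 : pvPrimaryKeys.foldl (fun out key =>
        if d.contains key && !(PySem.Set.contains pvSkipKeys key) then
          out ++ [key ++ "=" ++ d.getD key ""]
        else out) [] = Mp.map emitP := by
      rw [PySem.List.foldl_append_if (fun k => d.contains k && !(PySem.Set.contains pvSkipKeys k)) emitP]
      simp only [List.nil_append, hMp]
      congr 1
      apply List.filter_congr
      intro k hk
      have hsk : k ∉ pvSkipKeys := pv_primary_not_skip k hk
      cases h : d.contains k <;> simp [hsk]
    -- A's second loop body, rewritten to a single conditional append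
    have hbody : (fun (out : List String) key =>
        if PySem.Set.contains pvSkipKeys key then out
        else if pvPrimaryKeys.contains key then out
        else
          let v := d.getD key ""
          if v ≠ "" then out ++ [key ++ "=" ++ v] else out ++ [key]) =
        (fun out key =>
          if (!(PySem.Set.contains pvSkipKeys key) && !(pvPrimaryKeys.contains key)) then
            out ++ [emitS key]
          else out) := by
      funext out k
      by_cases h1 : k ∈ pvSkipKeys <;> by_cases h2 : k ∈ pvPrimaryKeys <;>
        by_cases h3 : d.getD k "" = "" <;> simp [h1, h2, h3, hemitS]
    have hA2 : (PySem.List.sorted d.keys (fun k => k)).foldl (fun out key =>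
        if PySem.Set.contains pvSkipKeys key then out
        else if pvPrimaryKeys.contains key then out
        else
          let v := d.getD key ""
          if v ≠ "" then out ++ [key ++ "=" ++ v] else out ++ [key]) (Mp.map emitP) =
        Mp.map emitP ++ Ms.map emitS := by
      rw [hbody, PySem.List.foldl_append_if
        (fun k => !(PySem.Set.contains pvSkipKeys k) && !(pvPrimaryKeys.contains k)) emitS]
    -- the sorted key list of B is exactly Mp ++ Ms
    have hperm : (Mp ++ Ms).Perm ks := by
      have hP := List.filter_append_perm (fun k => pvPrimaryKeys.contains k) ks
      refine List.Perm.trans (List.Perm.append ?_ ?_) hP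
      · -- Mp ~ ks.filter primary
        rw [List.perm_ext_iff_of_nodup (List.Nodup.filter _ pv_primary_nodup)
          (List.Nodup.filter _ (List.Nodup.filter _ hnd))]
        intro x
        rw [hMp_mem x]
        simp only [List.mem_filter]
        constructor
        · rintro ⟨hp, hk⟩
          have hsk : x ∉ pvSkipKeys := pv_primary_not_skip x hp
          simp [hk, hp, hsk]
        · intro hx
          simp at hx
          exact ⟨hx.2, hx.1.1⟩
      · -- Ms ~ ks.filter ¬primary
        have h1 : (PySem.List.sorted d.keys (fun k => k)).Perm d.keys :=
          PySem.List.sorted_perm d.keys (fun k => k) false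
        have h2 := List.Perm.filter
          (fun k => !(PySem.Set.contains pvSkipKeys k) && !(pvPrimaryKeys.contains k)) h1
        refine List.Perm.trans h2 ?_
        rw [hks, List.filter_filter]
        apply List.Perm.of_eq
        apply List.filter_congr
        intro x _
        cases hsk : PySem.Set.contains pvSkipKeys x <;>
          cases hpm : pvPrimaryKeys.contains x <;> simp
    have hpair : (Mp ++ Ms).Pairwise (fun a b => key a < key b) := by
      rw [List.pairwise_append]
      refine ⟨List.Pairwise.sublist List.filter_sublist pv_primary_pairwise, ?_, ?_⟩
      · -- within Ms: equal first components, strictly increasing strings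
        have hsorted : (PySem.List.sorted d.keys (fun k => k)).Pairwise (· ≤ ·) := by
          simpa using PySem.List.sorted_pairwise d.keys (fun k => k)
        have hnds : (PySem.List.sorted d.keys (fun k => k)).Nodup :=
          (PySem.List.sorted_perm d.keys (fun k => k) false).nodup_iff.mpr hnd
        have hlt : (PySem.List.sorted d.keys (fun k => k)).Pairwise (· < ·) := by
          have := List.Pairwise.and hsorted hnds
          exact this.imp (fun h => lt_of_le_of_ne h.1 h.2)
        have hltMs : Ms.Pairwise (· < ·) := List.Pairwise.sublist List.filter_sublist hlt
        refine List.Pairwise.imp_of_mem ?_ hltMs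
        intro a b ha hb hab
        have hna : a ∉ pvPrimaryKeys := ((hMs_mem a).1 ha).2.2
        have hnb : b ∉ pvPrimaryKeys := ((hMs_mem b).1 hb).2.2
        rw [hkey]
        rw [Prod.Lex.toLex_lt_toLex]
        right
        exact ⟨by rw [pv_rank_getD_of_not_mem a hna, pv_rank_getD_of_not_mem b hnb], hab⟩
      · -- across: primary rank < len(primary) = secondary rank
        intro a ha b hb
        have hpa : a ∈ pvPrimaryKeys := ((hMp_mem a).1 ha).1
        have hnb : b ∉ pvPrimaryKeys := ((hMs_mem b).1 hb).2.2
        rw [hkey, Prod.Lex.toLex_lt_toLex]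
        left
        rw [pv_rank_getD_of_not_mem b hnb]
        exact pv_rank_getD_lt a hpa
    have hsortB : PySem.List.sorted ks key = Mp ++ Ms :=
      PySem.List.sorted_eq_of_perm_of_pairwise_lt ks (Mp ++ Ms) key hperm hpair
    -- B's loop body as a single map
    have hbodyB : (fun (acc : List String) k =>
        if pvRank.contains k then acc ++ [k ++ "=" ++ d.getD k ""]
        else
          let v := d.getD k ""
          acc ++ [if v ≠ "" then k ++ "=" ++ v else k]) =
        (fun acc k => acc ++ [if pvRank.contains k then emitP k else emitS k]) := by
      funext acc k
      by_cases h : pvRank.contains k <;> simp [h, hemitP, hemitS]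
    have hB : (PySem.List.sorted ks key).foldl (fun acc k =>
        if pvRank.contains k then acc ++ [k ++ "=" ++ d.getD k ""]
        else
          let v := d.getD k ""
          acc ++ [if v ≠ "" then k ++ "=" ++ v else k]) [] =
        Mp.map emitP ++ Ms.map emitS := by
      rw [hbodyB, PySem.List.foldl_append_singleton_eq_map, hsortB, List.nil_append,
        List.map_append]
      congr 1
      · apply List.map_congr_left
        intro k hk
        have : k ∈ pvPrimaryKeys := ((hMp_mem k).1 hk).1
        simp [pv_rank_contains, this]
      · apply List.map_congr_left
        intro k hk
        have : k ∉ pvPrimaryKeys := ((hMs_mem k).1 hk).2.2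
        simp [pv_rank_contains, this]
    simp only [hA1, hA2, hB]
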